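-- pv_equiv track=rewrite | github.com/scszcoder/eCan.ai | build_system/smart_dynamic_detector.py | _is_project_module
-- ===== SOURCE A (Python) =====
-- def _is_project_module(module_name: str) -> bool:
--     """Check if it is a project internal module"""
--     project_prefixes = [
--         'agent', 'bot', 'common', 'config', 'gui', 'utils',
--         'telemetry', 'knowledge', 'settings', 'skills', 'build_system',
--         'resource', 'tests', 'docs', 'scripts'
--     ]
--
--     # Check if module name starts with project prefix
--     for prefix in project_prefixes:
--         if module_name.startswith(prefix + '.') or module_name == prefix:
--             return True
--
--     # Check if it is a module under project root directory
--     root_modules = ['main', 'app_context', 'build']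
--     if module_name in root_modules:
--         return True
--
--     return False
-- ===== SOURCE B (Python) =====
-- _PROJECT_PREFIX_SET = frozenset([
--     'agent', 'bot', 'common', 'config', 'gui', 'utils',
--     'telemetry', 'knowledge', 'settings', 'skills', 'build_system',
--     'resource', 'tests', 'docs', 'scripts'
-- ])
--
-- _ROOT_MODULE_SET = frozenset(['main', 'app_context', 'build'])
--
--
-- def _is_project_module(module_name: str) -> bool:
--     """Check if it is a project internal module"""
--     head = module_name.split('.', 1)[0]
--     return head in _PROJECT_PREFIX_SET or module_name in _ROOT_MODULE_SET
-- ===== Notes on version B (the rewrite author's own statement) =====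
-- stated objective: simpler
-- what changed: Replaces the per-prefix startswith/equality scan with computing the first dotted segment once via split('.', 1) and testing it for membership in a precomputed prefix set (root modules still matched by exact full-name membership).
import Mathlib
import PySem

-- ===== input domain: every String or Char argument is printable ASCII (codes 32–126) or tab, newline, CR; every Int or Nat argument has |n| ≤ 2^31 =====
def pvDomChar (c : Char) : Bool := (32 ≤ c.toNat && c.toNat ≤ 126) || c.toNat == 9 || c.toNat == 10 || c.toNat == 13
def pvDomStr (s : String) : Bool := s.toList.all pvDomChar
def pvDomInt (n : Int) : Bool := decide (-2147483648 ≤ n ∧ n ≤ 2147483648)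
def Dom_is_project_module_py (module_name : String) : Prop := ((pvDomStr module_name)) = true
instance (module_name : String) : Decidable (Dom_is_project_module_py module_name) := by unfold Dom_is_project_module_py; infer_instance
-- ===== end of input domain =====

-- B replaces A's per-prefix startswith scan by computing the first dotted segment once
-- (split('.', 1)[0]) and a set-membership test; objective: simpler. Return value only.

-- ===== PORT A =====
def pvProjectPrefixes : List String :=
  ["agent", "bot", "common", "config", "gui", "utils",
   "telemetry", "knowledge", "settings", "skills", "build_system",
   "resource", "tests", "docs", "scripts"]

-- the 'for prefix in project_prefixes: if …: return True' loop
def pvLoopA (module_name : String) : List String → Bool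
  | [] => false
  | p :: ps =>
    if PySem.Str.startswith module_name (p ++ ".") || module_name == p then true
    else pvLoopA module_name ps

def is_project_module_py (module_name : String) : Bool :=
  if pvLoopA module_name pvProjectPrefixes then true
  else if ["main", "app_context", "build"].contains module_name then true
  else false

-- ===== PORT B =====
def pvPrefixSet : PySem.Set String :=
  PySem.Set.ofList
    ["agent", "bot", "common", "config", "gui", "utils",
     "telemetry", "knowledge", "settings", "skills", "build_system",
     "resource", "tests", "docs", "scripts"]

def pvRootSet : PySem.Set String := PySem.Set.ofList ["main", "app_context", "build"]

def is_project_module_py_alt (module_name : String) : Bool :=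
  -- head = the first piece of a one-step split on the dot separator (nonempty), so splitMax?
  -- always returns 'some' of a nonempty list and the defaults below are never used
  let head := ((PySem.Str.splitMax? module_name "." 1).getD []).headD module_name
  PySem.Set.contains pvPrefixSet head || PySem.Set.contains pvRootSet module_name

-- ===== PRECONDITION & SPEC =====
def Spec_is_project_module_py (module_name : String) (out : Bool) : Prop := out = is_project_module_py_alt module_name
instance (module_name : String) (out : Bool) : Decidable (Spec_is_project_module_py module_name out) := by unfold Spec_is_project_module_py; infer_instance

-- ===== CLAIM (what is proved, stated in full; the proofs are below) =====
def Claim_equal_is_project_module_py : Prop := ∀ (module_name : String), Dom_is_project_module_py module_name → Spec_is_project_module_py module_name (is_project_module_py module_name)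

-- ===== LEMMAS AND PROOFS =====

-- splitOnMax.go with maxsplit already 0 just returns the rest as one piece
lemma pv_go_zero (fuel : ℕ) (l cur : List Char) (acc : List (List Char)) :
    PySem.Chars.splitOnMax.go ['.'] fuel 0 l cur acc = ((cur.reverse ++ l) :: acc).reverse := by
  cases fuel <;> cases l <;> simp [PySem.Chars.splitOnMax.go]

-- one-step split on a dot: the first piece is the chars before the first dot,
-- the (optional) second piece is everything after it
lemma pv_go_one (fuel : ℕ) (l cur : List Char) (acc : List (List Char)) (h : l.length < fuel) :
    PySem.Chars.splitOnMax.go ['.'] fuel 1 l cur acc =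
      (match l.dropWhile (fun c => c != '.') with
       | [] => ((cur.reverse ++ l.takeWhile (fun c => c != '.')) :: acc).reverse
       | _ :: rest => (rest :: (cur.reverse ++ l.takeWhile (fun c => c != '.')) :: acc).reverse) := by
  induction fuel generalizing l cur acc with
  | zero => omega
  | succ fuel ih =>
    cases l with
    | nil => simp [PySem.Chars.splitOnMax.go]
    | cons c l' =>
      by_cases hc : c = '.'
      · subst hc
        simp [PySem.Chars.splitOnMax.go, List.isPrefixOf, pv_go_zero,
              List.dropWhile, List.takeWhile]
      · have hlen : l'.length < fuel := by simp at h; omega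
        simp only [PySem.Chars.splitOnMax.go, List.isPrefixOf]
        rw [if_neg (by simp), if_neg (by simpa using Ne.symm hc), ih l' (c :: cur) acc hlen]
        have hb : (c == '.') = false := by simp [hc]
        cases hd : l'.dropWhile (fun c => c != '.') <;>
          · simp only [bne] at hd
            simp [List.takeWhile, bne, hb, hd]

lemma pv_head_splitOnMax (l : List Char) :
    (PySem.Chars.splitOnMax l ['.'] 1).head? = some (l.takeWhile (fun c => c != '.')) := by
  unfold PySem.Chars.splitOnMax
  rw [if_neg (by omega)]
  simp only [Int.toNat_one]
  rw [pv_go_one (l.length + 1) l [] [] (by omega)]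
  cases hd : l.dropWhile (fun c => c != '.') <;> simp

-- B's head is exactly the characters before the first dot
lemma pv_head_eq (s : String) :
    ((PySem.Str.splitMax? s "." 1).getD []).headD s =
      String.ofList (s.toList.takeWhile (fun c => c != '.')) := by
  unfold PySem.Str.splitMax? PySem.Chars.splitMax?
  rw [if_neg (by decide)]
  simp only [Option.map_some, Option.getD_some]
  have h := pv_head_splitOnMax s.toList
  cases hsp : PySem.Chars.splitOnMax s.toList ['.'] 1 with
  | nil => rw [hsp] at h; simp at h
  | cons a t => rw [hsp] at h; simp at h; simp [hsp, h]

-- a startswith-or-equality test against a dot-free prefix is a test on the first segment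
lemma pv_match_iff (l p : List Char) (hp : ('.' : Char) ∉ p) :
    (PySem.Chars.startswith l (p ++ ['.']) || l == p)
      = (l.takeWhile (fun c => c != '.') == p) := by
  induction l generalizing p with
  | nil =>
    cases p <;> simp [PySem.Chars.startswith]
  | cons c l' ih =>
    cases p with
    | nil =>
      by_cases hc : c = '.'
      · subst hc; simp [PySem.Chars.startswith, List.isPrefixOf, List.takeWhile]
      · have hb : (c == '.') = false := by simp [hc]
        have hb' : (('.' : Char) == c) = false := by simp [Ne.symm hc]
        simp [PySem.Chars.startswith, List.isPrefixOf, List.takeWhile, bne, hb, hb']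
    | cons q p' =>
      have hq : q ≠ '.' := fun h => hp (by simp [h])
      have hp' : ('.' : Char) ∉ p' := fun h => hp (by simp [h])
      have hbq : (q == '.') = false := by simp [hq]
      by_cases hc : c = '.'
      · subst hc
        have hq2 : (('.' : Char) == q) = false := by simp [Ne.symm hq]
        simp [PySem.Chars.startswith, List.isPrefixOf, List.takeWhile, bne, hbq, hq2]
      · have hb : (c == '.') = false := by simp [hc]
        by_cases hcq : c = q
        · subst hcq
          have hthis := ih p' hp'
          simp only [bne] at hthis
          simp [PySem.Chars.startswith, List.takeWhile, bne, hb] at hthis ⊢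
          exact hthis
        · have h1 : (q == c) = false := by simp; exact fun h => hcq h.symm
          have h2 : (c == q) = false := by simp [hcq]
          simp [PySem.Chars.startswith, List.isPrefixOf, List.takeWhile, bne, hb, h1, h2]

-- one term of A's loop, at String level
lemma pv_termA (s p : String) (hp : ('.' : Char) ∉ p.toList) :
    (PySem.Str.startswith s (p ++ ".") || s == p)
      = (String.ofList (s.toList.takeWhile (fun c => c != '.')) == p) := by
  rw [PySem.Str.startswith_eq]
  have h1 : (p ++ ".").toList = p.toList ++ ['.'] := by simp
  have h2 : (s == p) = (s.toList == p.toList) := by simp [String.ext_iff]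
  have h3 : (String.ofList (s.toList.takeWhile (fun c => c != '.')) == p)
      = (s.toList.takeWhile (fun c => c != '.') == p.toList) := by simp [String.ext_iff]
  rw [h1, h2, h3, pv_match_iff _ _ hp]

lemma pv_if_or (b c : Bool) : (if b then true else c) = (b || c) := by cases b <;> simp


-- ===== VERDICT (by name: the statement is the Claim_ definition above) =====
theorem is_project_module_py_spec : Claim_equal_is_project_module_py := by
  intro s _
  unfold Spec_is_project_module_py is_project_module_py is_project_module_py_alt
  rw [pv_head_eq]
  have hset : pvPrefixSet = pvProjectPrefixes := by decide
  have hroot : pvRootSet = ["main", "app_context", "build"] := by decide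
  rw [hset, hroot]
  simp only [pvLoopA, pvProjectPrefixes, pv_if_or]
  rw [pv_termA s "agent" (by decide), pv_termA s "bot" (by decide),
      pv_termA s "common" (by decide), pv_termA s "config" (by decide),
      pv_termA s "gui" (by decide), pv_termA s "utils" (by decide),
      pv_termA s "telemetry" (by decide), pv_termA s "knowledge" (by decide),
      pv_termA s "settings" (by decide), pv_termA s "skills" (by decide),
      pv_termA s "build_system" (by decide), pv_termA s "resource" (by decide),
      pv_termA s "tests" (by decide), pv_termA s "docs" (by decide),
      pv_termA s "scripts" (by decide)]
  simp [PySem.Set.contains, Bool.or_assoc, beq_eq_decide]
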